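-- pv_equiv track=rewrite | github.com/mission-learning/Algorithms | Graph algorithms/Sequence of removal to keep the graph connected.py | DFS
-- ===== SOURCE A (Python) =====
-- class Vertex():
--
--     def __init__(self):
--
--         self.parent = None
--         self.visited = False
--         self.entry = 0
--         self.process = 0
--         self.id = 0
--
-- def DFS( G ):
--
--     time = 0
--     V= []
--
--     def DFS_visit(v,time):
--
--         time += 1
--         v.visited = True
--         v.entry = time
--
--         for index in G[v.id]:
--
--             if V[index].visited == False:
--
--                 V[index].parent = v.id
--                 return DFS_visit(V[index],time)
--
--         time += 1
--         v.process = time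
--         return time
--
--
--     for i in range(len(G)):
--
--         v = Vertex()
--         v.id = i
--         V.append(v)
--
--     time_max = 0
--     tmp = 0
--
--     for v in V:
--
--         if v.visited == False:
--
--             tmp = DFS_visit(v,time)
--             if tmp > time_max:
--                 time_max = tmp
--
--     result = []
--
--
--     for i in range(len(V)):
--
--
--         result.append(time_max - V[i].entry)
--
--     return result
-- ===== SOURCE B (Python) =====
-- def DFS(G):
--     n = len(G)
--     visited = [False] * n
--     entry = [0] * n
--     best = 0
--     for s in range(n):
--         if visited[s]:
--             continue
--         path = []
--         v = s
--         while True: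
--             visited[v] = True
--             path.append(v)
--             nxt = None
--             for j in G[v]:
--                 if not visited[j]:
--                     nxt = j
--                     break
--             if nxt is None:
--                 break
--             v = nxt
--         for k, u in enumerate(path):
--             entry[u] = k + 1
--         best = max(best, len(path) + 1)
--     return [best - e for e in entry]
-- ===== Notes on version B (the rewrite author's own statement) =====
-- stated objective: simpler
-- what changed: Replaces the recursive, object-mutating DFS_visit (a Vertex class with parent/process bookkeeping and a time counter threaded through the recursion) by a per-root iterative walk that collects the visited chain as an explicit path list and then assigns entry times from the path's positions and takes the maximum from its length.
-- outside the precondition, e.g. on DFS([[1, 5], []]): A returns [2, 1], B returns [2, 1]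
import Mathlib
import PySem

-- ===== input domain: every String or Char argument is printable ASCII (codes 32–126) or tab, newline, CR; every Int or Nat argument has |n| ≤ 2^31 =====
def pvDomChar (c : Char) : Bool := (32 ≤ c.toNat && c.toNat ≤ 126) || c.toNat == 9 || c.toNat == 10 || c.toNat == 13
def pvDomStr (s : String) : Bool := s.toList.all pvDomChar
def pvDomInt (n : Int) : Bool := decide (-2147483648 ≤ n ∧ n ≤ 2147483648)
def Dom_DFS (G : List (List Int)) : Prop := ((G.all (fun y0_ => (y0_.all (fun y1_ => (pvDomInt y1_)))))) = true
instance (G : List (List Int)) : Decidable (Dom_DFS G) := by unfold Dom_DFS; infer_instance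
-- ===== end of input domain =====

-- B replaces A's object-mutating recursive DFS_visit by a per-root iterative walk that collects the
-- chain as an explicit path list and assigns entry times / the maximum afterwards (objective: simpler).

-- ===== PORT A =====
-- Python index wraparound for an index j with -n ≤ j < n (the range Pre_DFS admits)
def pvWrap (n : Nat) (j : Int) : Nat := (if j < 0 then j + n else j).toNat

structure VertexA where
  parent : Option Int
  visited : Bool
  entry : Int
  process : Int
  id : Int
deriving Repr, DecidableEq

def dvA : VertexA := ⟨none, false, 0, 0, 0⟩

-- the `for index in G[v.id]` scan: first index whose vertex is unvisited (returned wrapped)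
def scanA (n : Nat) (V : List VertexA) : List Int → Option Nat
  | [] => none
  | j :: rest =>
      let jn := pvWrap n j
      if (V.getD jn dvA).visited = false then some jn else scanA n V rest

-- DFS_visit, tail recursion on the vertex index with a fuel bound (never exhausted: each call
-- marks a previously unvisited vertex)
def visitA (G : List (List Int)) : Nat → Nat → Int → List VertexA → Int × List VertexA
  | 0, _, time, V => (time, V)
  | fuel + 1, v, time, V =>
      let time := time + 1
      let V := V.set v { V.getD v dvA with visited := true, entry := time }
      match scanA G.length V (G.getD v []) with
      | some j =>
          let V := V.set j { V.getD j dvA with parent := some (v : Int) }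
          visitA G fuel j time V
      | none =>
          let time := time + 1
          (time, V.set v { V.getD v dvA with process := time })

def DFS (G : List (List Int)) : List Int :=
  let n := G.length
  let V : List VertexA := (List.range n).map (fun i => ⟨none, false, 0, 0, (i : Int)⟩)
  let st := (List.range n).foldl
    (fun (st : Int × List VertexA) i =>
      if (st.2.getD i dvA).visited = false then
        let r := visitA G (n + 1) i 0 st.2
        (if r.1 > st.1 then r.1 else st.1, r.2)
      else st)
    (0, V)
  (List.range n).map (fun i => st.1 - (st.2.getD i dvA).entry)

-- ===== PORT B =====
-- the inner `for j in G[v]` search for the first unvisited neighbour (returned wrapped)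
def firstUnvisB (n : Nat) (visited : List Bool) : List Int → Option Nat
  | [] => none
  | j :: rest =>
      let jn := pvWrap n j
      if visited.getD jn false = false then some jn else firstUnvisB n visited rest

-- the `while True` walk: mark v, append it to path, move to the first unvisited neighbour
def walkB (G : List (List Int)) : Nat → Nat → List Bool → List Nat → List Bool × List Nat
  | 0, _, visited, path => (visited, path)
  | fuel + 1, v, visited, path =>
      let visited := visited.set v true
      let path := path ++ [v]
      match firstUnvisB G.length visited (G.getD v []) with
      | none => (visited, path)
      | some j => walkB G fuel j visited path

-- `for k, u in enumerate(path): entry[u] = k + 1`, carrying k+1 as the accumulator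
def writeEntries : List Int → Int → List Nat → List Int
  | e, _, [] => e
  | e, k, u :: rest => writeEntries (e.set u k) (k + 1) rest

def DFS_alt (G : List (List Int)) : List Int :=
  let n := G.length
  let st := (List.range n).foldl
    (fun (st : List Bool × List Int × Int) s =>
      if st.1.getD s false then st
      else
        let w := walkB G (n + 1) s st.1 []
        (w.1, writeEntries st.2.1 1 w.2, max st.2.2 ((w.2.length : Int) + 1)))
    (List.replicate n false, List.replicate n 0, 0)
  st.2.1.map (fun e => st.2.2 - e)

-- ===== PRECONDITION & SPEC =====
-- Pre_ excludes the graphs with an out-of-range adjacency entry (j < -len(G) or j >= len(G)), on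
-- which Python raises IndexError when the entry is reached; if the traversal never reaches such an
-- entry both programs still return (the same value), so Pre_ slightly over-approximates the crashes.
-- In-range negative entries wrap in both programs and are admitted.
def Pre_DFS (G : List (List Int)) : Prop :=
  ∀ adj ∈ G, ∀ j ∈ adj, -(G.length : Int) ≤ j ∧ j < (G.length : Int)
instance (G : List (List Int)) : Decidable (Pre_DFS G) := by unfold Pre_DFS; infer_instance

def pvWitness_DFS : List (List Int) := [[1, 2], [-3], [0, 1]]

def Spec_DFS (G : List (List Int)) (out : List Int) : Prop := out = DFS_alt G
instance (G : List (List Int)) (out : List Int) : Decidable (Spec_DFS G out) := by unfold Spec_DFS; infer_instance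

-- ===== CLAIM (what is proved, stated in full; the proofs are below) =====
def Claim_equal_DFS : Prop := ∀ (G : List (List Int)), Dom_DFS G → Pre_DFS G → Spec_DFS G (DFS G)

-- ===== LEMMAS AND PROOFS =====

theorem pvWrap_lt (n : Nat) (j : Int) (h1 : -(n : Int) ≤ j) (h2 : j < (n : Int)) :
    pvWrap n j < n := by
  unfold pvWrap; split <;> omega

theorem getD_map_vis (V : List VertexA) (k : Nat) :
    (V.map (·.visited)).getD k false = (V.getD k dvA).visited := by
  induction V generalizing k with
  | nil => simp [dvA]
  | cons a t ih =>
      cases k with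
      | zero => rfl
      | succ m => simpa [List.getD_cons_succ] using ih m

theorem getD_set_self {α : Type} (l : List α) (i : Nat) (x d : α) (h : i < l.length) :
    (l.set i x).getD i d = x := by
  rw [List.getD_eq_getElem _ _ (by simpa using h)]
  simp

theorem count_false_set (l : List Bool) (i : Nat) (h : i < l.length)
    (hf : l[i] = false) : (l.set i true).count false + 1 = l.count false := by
  induction l generalizing i with
  | nil => simp at h
  | cons a t ih =>
      cases i with
      | zero => simp at hf; simp [hf]
      | succ m =>
          simp at h hf
          have := ih m h hf
          simp [List.count_cons]
          omega

theorem scan_eq (n : Nat) (V : List VertexA) (adj : List Int) :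
    scanA n V adj = firstUnvisB n (V.map (·.visited)) adj := by
  induction adj with
  | nil => rfl
  | cons j rest ih =>
      simp only [scanA, firstUnvisB, getD_map_vis, ih]

theorem scan_some (n : Nat) (V : List VertexA) (adj : List Int) (j : Nat)
    (h : scanA n V adj = some j) :
    (V.getD j dvA).visited = false ∧ ∃ j0 ∈ adj, j = pvWrap n j0 := by
  induction adj with
  | nil => simp [scanA] at h
  | cons a rest ih =>
      simp only [scanA] at h
      split at h
      · rename_i hv
        obtain rfl : pvWrap n a = j := by simpa using h
        exact ⟨hv, a, by simp, rfl⟩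
      · obtain ⟨hv, j0, hj0, hw⟩ := ih h
        exact ⟨hv, j0, by simp [hj0], hw⟩

-- the heart: A's recursive DFS_visit and B's iterative walk traverse the same chain q
theorem visit_walk (G : List (List Int)) (hpre : Pre_DFS G) :
    ∀ (fuel : Nat) (v : Nat) (t : Int) (V : List VertexA) (path : List Nat),
      V.length = G.length → v < G.length →
      (V.map (·.visited)).count false < fuel →
      (V.getD v dvA).visited = false →
      ∃ q : List Nat,
        walkB G fuel v (V.map (·.visited)) path =
          ((visitA G fuel v t V).2.map (·.visited), path ++ q) ∧
        (visitA G fuel v t V).1 = t + (q.length : Int) + 1 ∧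
        (visitA G fuel v t V).2.map (·.entry) = writeEntries (V.map (·.entry)) (t + 1) q ∧
        (visitA G fuel v t V).2.length = G.length := by
  intro fuel
  induction fuel with
  | zero => intro v t V path hlen hv hcnt hvis; exact absurd hcnt (Nat.not_lt_zero _)
  | succ fuel ih =>
      intro v t V path hlen hv hcnt hvis
      have hvlen : v < V.length := by omega
      set V1 : List VertexA := V.set v { V.getD v dvA with visited := true, entry := t + 1 } with hV1
      have hlen1 : V1.length = G.length := by simp [hV1, hlen]
      have hmapvis1 : V1.map (·.visited) = (V.map (·.visited)).set v true := by
        simp [hV1, List.map_set]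
      have hmapent1 : V1.map (·.entry) = (V.map (·.entry)).set v (t + 1) := by
        simp [hV1, List.map_set]
      have hstepA : visitA G (fuel + 1) v t V =
          (match scanA G.length V1 (G.getD v []) with
           | some j => visitA G fuel j (t + 1) (V1.set j { V1.getD j dvA with parent := some (v : Int) })
           | none => (t + 1 + 1, V1.set v { V1.getD v dvA with process := t + 1 + 1 })) := by
        simp only [visitA, hV1]
      have hstepB : walkB G (fuel + 1) v (V.map (·.visited)) path =
          (match firstUnvisB G.length (V1.map (·.visited)) (G.getD v []) with
           | none => (V1.map (·.visited), path ++ [v])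
           | some j => walkB G fuel j (V1.map (·.visited)) (path ++ [v])) := by
        simp only [walkB, hmapvis1]
      have hscan_fu : firstUnvisB G.length (V1.map (·.visited)) (G.getD v []) =
          scanA G.length V1 (G.getD v []) := (scan_eq _ _ _).symm
      have hgetD1v : V1.getD v dvA = { V.getD v dvA with visited := true, entry := t + 1 } :=
        getD_set_self _ _ _ _ hvlen
      rcases hscan : scanA G.length V1 (G.getD v []) with _ | j
      · -- no unvisited neighbour: the walk ends at v
        refine ⟨[v], ?_, ?_, ?_, ?_⟩
        · simp only [hstepB, hscan_fu, hscan, hstepA]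
          simp only [List.map_set, hgetD1v]
          rw [hmapvis1, List.set_set]
        · simp only [hstepA, hscan]
          simp
        · simp only [hstepA, hscan]
          simp only [List.map_set, hgetD1v]
          rw [hmapent1, List.set_set]
          rfl
        · simp only [hstepA, hscan]
          simp [hlen1]
      · -- walk continues to j
        obtain ⟨hvj, j0, hj0mem, hjw⟩ := scan_some _ _ _ _ hscan
        have hadjmem : G.getD v [] ∈ G := by
          rw [List.getD_eq_getElem _ _ (by omega)]
          exact List.getElem_mem _
        have hjlt : j < G.length := by
          obtain ⟨hb1, hb2⟩ := hpre _ hadjmem _ hj0mem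
          rw [hjw]; exact pvWrap_lt _ _ hb1 hb2
        have hjV1 : j < V1.length := by omega
        set V2 : List VertexA := V1.set j { V1.getD j dvA with parent := some (v : Int) } with hV2
        have hlen2 : V2.length = G.length := by simp [hV2, hlen1]
        have hmapvis2 : V2.map (·.visited) = V1.map (·.visited) := by
          rw [hV2, List.map_set, List.getD_eq_getElem _ _ hjV1]
          have h1 : ({ V1[j] with parent := some (v : Int) } : VertexA).visited =
              (V1.map (·.visited))[j]'(by simpa using hjV1) := by simp
          rw [h1, List.set_getElem_self]
        have hmapent2 : V2.map (·.entry) = V1.map (·.entry) := by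
          rw [hV2, List.map_set, List.getD_eq_getElem _ _ hjV1]
          have h1 : ({ V1[j] with parent := some (v : Int) } : VertexA).entry =
              (V1.map (·.entry))[j]'(by simpa using hjV1) := by simp
          rw [h1, List.set_getElem_self]
        have hvltm : v < (V.map (·.visited)).length := by simpa using hvlen
        have hgf : (V.map (·.visited))[v]'hvltm = false := by
          simp only [List.getElem_map]
          rw [← List.getD_eq_getElem _ dvA hvlen]
          exact hvis
        have hcnt2 : (V2.map (·.visited)).count false < fuel := by
          rw [hmapvis2, hmapvis1]
          have := count_false_set (V.map (·.visited)) v hvltm hgf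
          omega
        have hvis2 : (V2.getD j dvA).visited = false := by
          rw [hV2, getD_set_self _ _ _ _ hjV1]
          exact hvj
        obtain ⟨q', hwalk', htime', hent', hlen'⟩ :=
          ih j (t + 1) V2 (path ++ [v]) hlen2 hjlt hcnt2 hvis2
        refine ⟨v :: q', ?_, ?_, ?_, ?_⟩
        · simp only [hstepB, hscan_fu, hscan, hstepA]
          rw [← hmapvis2, hwalk']
          simp
          rfl
        · simp only [hstepA, hscan]
          rw [htime']
          simp only [List.length_cons]
          push_cast
          ring
        · simp only [hstepA, hscan]
          rw [hent', hmapent2, hmapent1]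
          rfl
        · simp only [hstepA, hscan]
          exact hlen'

theorem final_map (tm : Int) (W : List VertexA) (n : Nat) (h : W.length = n) :
    (List.range n).map (fun i => tm - (W.getD i dvA).entry) =
      (W.map (·.entry)).map (fun e => tm - e) := by
  apply List.ext_getElem
  · simp [h]
  · intro i h1 h2
    have hiW : i < W.length := by simp at h1; omega
    simp [List.getElem?_eq_getElem hiW]

theorem fold_outer (G : List (List Int)) (hpre : Pre_DFS G) :
    ∀ (rs : List Nat) (V : List VertexA) (tm : Int),
      (∀ i ∈ rs, i < G.length) → V.length = G.length →
      (rs.foldl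
        (fun (st : List Bool × List Int × Int) s =>
          if st.1.getD s false then st
          else
            let w := walkB G (G.length + 1) s st.1 []
            (w.1, writeEntries st.2.1 1 w.2, max st.2.2 ((w.2.length : Int) + 1)))
        (V.map (·.visited), V.map (·.entry), tm)) =
        ((rs.foldl
            (fun (st : Int × List VertexA) i =>
              if (st.2.getD i dvA).visited = false then
                let r := visitA G (G.length + 1) i 0 st.2
                (if r.1 > st.1 then r.1 else st.1, r.2)
              else st)
            (tm, V)).2.map (·.visited),
         (rs.foldl
            (fun (st : Int × List VertexA) i =>
              if (st.2.getD i dvA).visited = false then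
                let r := visitA G (G.length + 1) i 0 st.2
                (if r.1 > st.1 then r.1 else st.1, r.2)
              else st)
            (tm, V)).2.map (·.entry),
         (rs.foldl
            (fun (st : Int × List VertexA) i =>
              if (st.2.getD i dvA).visited = false then
                let r := visitA G (G.length + 1) i 0 st.2
                (if r.1 > st.1 then r.1 else st.1, r.2)
              else st)
            (tm, V)).1) ∧
        (rs.foldl
            (fun (st : Int × List VertexA) i =>
              if (st.2.getD i dvA).visited = false then
                let r := visitA G (G.length + 1) i 0 st.2
                (if r.1 > st.1 then r.1 else st.1, r.2)
              else st)
            (tm, V)).2.length = G.length := by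
  intro rs
  induction rs with
  | nil => intro V tm _ hlen; exact ⟨rfl, hlen⟩
  | cons i rs' ih =>
      intro V tm hmem hlen
      have hi : i < G.length := hmem i (by simp)
      simp only [List.foldl_cons]
      by_cases hv : (V.getD i dvA).visited = false
      · have hB : (V.map (·.visited)).getD i false = false := by rw [getD_map_vis]; exact hv
        simp only [hB, hv, if_true, Bool.false_eq_true, if_false]
        have hcnt : (V.map (·.visited)).count false < G.length + 1 := by
          have := List.count_le_length (l := V.map (·.visited)) (a := false)
          simp at this
          omega
        obtain ⟨q, hwalk, htime, hent, hlen'⟩ :=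
          visit_walk G hpre (G.length + 1) i 0 V [] hlen hi hcnt hv
        simp only at hwalk htime hent
        rw [hwalk]
        have hmax : max tm (((([] : List Nat) ++ q).length : Int) + 1) =
            (if (visitA G (G.length + 1) i 0 V).1 > tm then (visitA G (G.length + 1) i 0 V).1
             else tm) := by
          rw [htime]
          simp only [List.nil_append]
          split_ifs <;> omega
        rw [hmax]
        have hentq : writeEntries (V.map (·.entry)) 1 (([] : List Nat) ++ q) =
            (visitA G (G.length + 1) i 0 V).2.map (·.entry) := by
          rw [hent]
          norm_num
        rw [hentq]
        exact ih _ _ (fun k hk => hmem k (by simp [hk])) hlen'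
      · have hB : (V.map (·.visited)).getD i false = true := by
          rw [getD_map_vis]
          simpa using hv
        simp only [hB, hv, if_true, if_false]
        exact ih _ _ (fun k hk => hmem k (by simp [hk])) hlen

theorem map_vis_init (n : Nat) :
    ((List.range n).map (fun i => (⟨none, false, 0, 0, (i : Int)⟩ : VertexA))).map (·.visited) =
      List.replicate n false := by
  rw [List.map_map]
  simp [List.eq_replicate_iff, Function.comp]

theorem map_ent_init (n : Nat) :
    ((List.range n).map (fun i => (⟨none, false, 0, 0, (i : Int)⟩ : VertexA))).map (·.entry) =
      List.replicate n (0 : Int) := by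
  rw [List.map_map]
  simp [List.eq_replicate_iff, Function.comp]

-- ===== VERDICT (by name: the statement is the Claim_ definition above) =====
theorem DFS_spec : Claim_equal_DFS := by
  intro G _ hpre
  show DFS G = DFS_alt G
  simp only [DFS, DFS_alt]
  rw [← map_vis_init G.length, ← map_ent_init G.length]
  obtain ⟨h1, h2⟩ := fold_outer G hpre (List.range G.length)
    ((List.range G.length).map (fun i => (⟨none, false, 0, 0, (i : Int)⟩ : VertexA))) 0
    (fun k hk => by simpa using hk) (by simp)
  rw [h1]
  exact final_map _ _ _ h2
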